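-- pv_equiv track=rewrite | github.com/JSeam2/evm-semantics | tests/gen-spec.py | inherit_get
-- ===== SOURCE A (Python) =====
-- def safe_get(config, section):
--     if section in config:
--         return config[section]
--     else:
--         return {}
--
-- def inherit_get(config, section):
--     if not section:
--         return safe_get(config, 'DEFAULT')
--     else:
--         parent = inherit_get(config, '-'.join(section.split('-')[:-1]))
--         current = safe_get(config, section)
--         merged = {**parent, **current}
--         for key in list(merged.keys()):
--             if key.startswith('+'):
--                 merged[key[1:]] += merged[key]
--                 del merged[key]
--         return merged
-- ===== SOURCE B (Python) =====
-- def safe_get(config, section):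
--     if section in config:
--         return config[section]
--     else:
--         return {}
--
-- def inherit_get(config, section):
--     # Iterative bottom-up merge: split once, walk the prefixes left to right,
--     # merging each existing level into the accumulated dict and folding '+' keys.
--     merged = dict(safe_get(config, 'DEFAULT'))
--     if not section:
--         return merged
--     prefix = None
--     for seg in section.split('-'):
--         prefix = seg if prefix is None else prefix + '-' + seg
--         if prefix:
--             merged = {**merged, **safe_get(config, prefix)}
--             for key in list(merged.keys()):
--                 if key.startswith('+'):
--                     merged[key[1:]] += merged[key]
--                     del merged[key]
--     return merged
-- ===== Notes on version B (the rewrite author's own statement) =====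
-- stated objective: alternative
-- what changed: Replaces A's top-down recursion, which re-splits and re-joins the section string at every inheritance level, by a single split followed by one iterative left-to-right fold over the prefixes that accumulates the prefix string and the merged dict.
import Mathlib
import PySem

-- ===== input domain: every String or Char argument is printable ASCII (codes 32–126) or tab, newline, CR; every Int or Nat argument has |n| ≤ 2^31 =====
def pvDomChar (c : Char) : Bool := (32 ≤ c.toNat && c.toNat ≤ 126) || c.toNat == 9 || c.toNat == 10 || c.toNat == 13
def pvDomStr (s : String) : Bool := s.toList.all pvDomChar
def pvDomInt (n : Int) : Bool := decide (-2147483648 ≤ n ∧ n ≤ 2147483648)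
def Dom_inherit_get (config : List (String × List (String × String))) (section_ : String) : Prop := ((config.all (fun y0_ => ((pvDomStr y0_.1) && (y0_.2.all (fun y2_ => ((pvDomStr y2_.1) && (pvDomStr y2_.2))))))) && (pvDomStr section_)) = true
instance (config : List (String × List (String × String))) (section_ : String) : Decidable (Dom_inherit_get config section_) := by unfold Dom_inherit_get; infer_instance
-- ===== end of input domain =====

-- B replaces A's top-down recursion (which re-splits the section at every level) by one split
-- and a single left-to-right fold over the prefixes; objective: alternative decomposition.

-- ===== PORT A =====
-- shared A/B helper: Python safe_get (both sources contain it verbatim)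
def pvSafeGet (config : List (String × List (String × String))) (section_ : String) : PySem.Dict String String :=
  match PySem.Dict.get? (PySem.Dict.mk config) section_ with
  | some d => PySem.Dict.mk d
  | none => PySem.Dict.mk []

-- shared A/B helper: merged = {**parent, **current}
def pvUpdate (parent current : PySem.Dict String String) : PySem.Dict String String :=
  current.items.foldl (fun m kv => m.insert kv.1 kv.2) parent

-- shared A/B helper: the identical '+'-folding loop of both sources
-- (`for key in list(merged.keys()): if key.startswith('+'): merged[key[1:]] += merged[key]; del merged[key]`).
-- `merged[key[1:]]` / `merged[key]` are ported as getD _ "": on inputs satisfying Pre_ both keys are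
-- present when read, so getD returns exactly the Python value (exactly outside Pre_ Python raises KeyError).
def pvPlus (merged : PySem.Dict String String) : PySem.Dict String String :=
  merged.keys.foldl
    (fun m key =>
      if PySem.Str.startswith key "+" then
        let base := PySem.Str.slice key (some 1) none
        PySem.Dict.erase (PySem.Dict.insert m base (PySem.Dict.getD m base "" ++ PySem.Dict.getD m key "")) key
      else m)
    merged

-- pvSplit/pvCons and the lemmas up to pvParent_lt are needed by the port's termination proof,
-- so they stay above it (pvParent_lt is cited by name in decreasing_by).
def pvSplit : List Char → List (List Char)
  | [] => [[]]
  | c :: rest =>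
    if c = '-' then [] :: pvSplit rest
    else
      match pvSplit rest with
      | [] => [[c]]
      | h :: t => (c :: h) :: t

def pvCons (x : List Char) : List (List Char) → List (List Char)
  | [] => [x]
  | h :: t => (x ++ h) :: t

theorem pvSplit_ne_nil (s : List Char) : pvSplit s ≠ [] := by
  induction s with
  | nil => simp [pvSplit]
  | cons c rest ih =>
    simp only [pvSplit]
    split
    · simp
    · split <;> simp

theorem pvGo_spec (l : List Char) : ∀ (fuel : Nat) (cur : List Char) (acc : List (List Char)),
    l.length < fuel →
    PySem.Chars.splitOn.go ['-'] fuel l cur acc = acc.reverse ++ pvCons cur.reverse (pvSplit l) := by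
  induction l with
  | nil =>
    intro fuel cur acc h
    obtain ⟨f, rfl⟩ : ∃ f, fuel = f + 1 := ⟨fuel - 1, by omega⟩
    simp [PySem.Chars.splitOn.go, pvSplit, pvCons]
  | cons c rest ih =>
    intro fuel cur acc h
    obtain ⟨f, rfl⟩ : ∃ f, fuel = f + 1 := ⟨fuel - 1, by omega⟩
    have hrest : rest.length < f := by simpa using h
    by_cases hc : c = '-'
    · subst hc
      have : PySem.Chars.splitOn.go ['-'] (f+1) ('-' :: rest) cur acc
          = PySem.Chars.splitOn.go ['-'] f rest [] (cur.reverse :: acc) := by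
        simp [PySem.Chars.splitOn.go]
      rw [this, ih f [] (cur.reverse :: acc) hrest]
      rcases h' : pvSplit rest with _ | ⟨a, t⟩
      · exact absurd h' (pvSplit_ne_nil rest)
      · simp [pvSplit, pvCons, h']
    · have : PySem.Chars.splitOn.go ['-'] (f+1) (c :: rest) cur acc
          = PySem.Chars.splitOn.go ['-'] f rest (c :: cur) acc := by
        simp [PySem.Chars.splitOn.go, List.isPrefixOf]
        intro h'; exact absurd h'.symm hc
      rw [this, ih f (c :: cur) acc hrest]
      simp only [pvSplit, if_neg hc]
      rcases hsp : pvSplit rest with _ | ⟨h1, t1⟩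
      · exact absurd hsp (pvSplit_ne_nil rest)
      · simp [pvCons]

theorem pvSplitOn_eq (s : List Char) : PySem.Chars.splitOn s ['-'] = pvSplit s := by
  have := pvGo_spec s (s.length + 1) [] [] (by omega)
  simpa [PySem.Chars.splitOn, pvCons] using
    (this.trans (by rcases h : pvSplit s with _ | ⟨a, t⟩
                    · exact absurd h (pvSplit_ne_nil s)
                    · simp [pvCons]))

theorem pvJoin_append_singleton (ys : List (List Char)) (z : List Char) (h : ys ≠ []) :
    PySem.Chars.join ['-'] (ys ++ [z]) = PySem.Chars.join ['-'] ys ++ '-' :: z := by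
  induction ys with
  | nil => exact absurd rfl h
  | cons a t ih =>
    rcases t with _ | ⟨b, t'⟩
    · simp [PySem.Chars.join_cons_cons, PySem.Chars.join_singleton]
    · have e : ((a :: b :: t' : List (List Char)) ++ [z]) = a :: b :: (t' ++ [z]) := by simp
      rw [e, PySem.Chars.join_cons_cons]
      have hih := ih (by simp)
      rw [List.cons_append] at hih
      rw [hih, PySem.Chars.join_cons_cons]
      simp

theorem pvJoin_pvSplit (s : List Char) : PySem.Chars.join ['-'] (pvSplit s) = s := by
  induction s with
  | nil => simp [pvSplit, PySem.Chars.join_singleton]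
  | cons c rest ih =>
    simp only [pvSplit]
    by_cases hc : c = '-'
    · subst hc
      rw [if_pos rfl]
      rcases h : pvSplit rest with _ | ⟨a, t⟩
      · exact absurd h (pvSplit_ne_nil rest)
      · rw [h] at ih
        rw [PySem.Chars.join_cons_cons, ih]
        simp
    · rw [if_neg hc]
      rcases h : pvSplit rest with _ | ⟨a, t⟩
      · exact absurd h (pvSplit_ne_nil rest)
      · rw [h] at ih
        rcases t with _ | ⟨b, t'⟩
        · rw [PySem.Chars.join_singleton] at ih ⊢
          simp [ih]
        · rw [PySem.Chars.join_cons_cons] at ih ⊢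
          simp [ih]

-- termination lemma for port A: the parent section string is strictly shorter
theorem pvParent_lt (s : List Char) (h : ¬ s = []) :
    (PySem.Chars.join ['-'] (PySem.List.slice (PySem.Chars.splitOn s ['-']) none (some (-1)))).length < s.length := by
  rw [PySem.List.slice_to_neg_one, pvSplitOn_eq]
  rcases hxs : (pvSplit s).dropLast with _ | ⟨a, t⟩
  · rw [PySem.Chars.join_nil]
    cases s with
    | nil => exact absurd rfl h
    | cons c r => simp
  · have hsplit : pvSplit s = (pvSplit s).dropLast ++ [(pvSplit s).getLast (pvSplit_ne_nil s)] :=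
      (List.dropLast_append_getLast (pvSplit_ne_nil s)).symm
    rw [hxs] at hsplit
    calc (PySem.Chars.join ['-'] (a :: t)).length
        < (PySem.Chars.join ['-'] (a :: t) ++ '-' :: (pvSplit s).getLast (pvSplit_ne_nil s)).length := by
          simp
      _ = s.length := by
          rw [← pvJoin_append_singleton _ _ (by simp : (a :: t : List (List Char)) ≠ []),
              ← hsplit, pvJoin_pvSplit]

-- port of A: recursion on the section string, re-splitting it at every level
def pvInheritA (config : List (String × List (String × String))) (s : List Char) : PySem.Dict String String :=
  if h : s = [] then pvSafeGet config "DEFAULT"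
  else
    let parent := pvInheritA config (PySem.Chars.join ['-'] (PySem.List.slice (PySem.Chars.splitOn s ['-']) none (some (-1))))
    let current := pvSafeGet config (String.ofList s)
    pvPlus (pvUpdate parent current)
termination_by s.length
decreasing_by exact pvParent_lt s h

def inherit_get (config : List (String × List (String × String))) (section_ : String) : List (String × String) :=
  (pvInheritA config section_.toList).items

-- ===== PORT B =====
-- Source B's loop body: carry (prefix so far : None | str, merged dict); an empty prefix is skipped
def pvAltStep (config : List (String × List (String × String)))
    (st : Option (List Char) × PySem.Dict String String) (seg : List Char) :
    Option (List Char) × PySem.Dict String String :=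
  let pfx := match st.1 with
    | none => seg
    | some p => p ++ '-' :: seg
  if pfx = [] then (some pfx, st.2)
  else (some pfx, pvPlus (pvUpdate st.2 (pvSafeGet config (String.ofList pfx))))

def inherit_get_alt (config : List (String × List (String × String))) (section_ : String) : List (String × String) :=
  let merged0 := pvSafeGet config "DEFAULT"
  if section_.toList = [] then merged0.items
  else
    ((PySem.Chars.splitOn section_.toList ['-']).foldl (pvAltStep config) (none, merged0)).2.items

-- ===== PRECONDITION & SPEC =====
-- Pre_ helpers: everything is stated on KEY LISTS only (which keys each prefix section has),
-- never on the merged values or either port's code.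
-- keys of config[p] (empty if p is not a section); first-occurrence order, late duplicates dropped
def pvKeysAt (config : List (String × List (String × String))) (p : String) : List String :=
  match PySem.Dict.get? (PySem.Dict.mk config) p with
  | some d => (PySem.Dict.mk d).keys
  | none => []

def pvOrderedUnion (a b : List String) : List String :=
  a ++ b.filter (fun k => !a.contains k)

-- the nonempty prefixes 'seg1', 'seg1-seg2', … of the section (one split, left to right)
def pvPrefixList (s : List Char) : List (List Char) :=
  ((PySem.Chars.splitOn s ['-']).foldl
    (fun (st : Option (List Char) × List (List Char)) seg =>
      let pfx := match st.1 with | none => seg | some p => p ++ '-' :: seg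
      (some pfx, if pfx = [] then st.2 else st.2 ++ [pfx]))
    (none, [])).2

-- K is the merged key list at one level: every '+'-key's base key must be present when it is
-- read — a non-'+' base anywhere in K, a '+' base strictly later in K (earlier ones are already deleted)
def pvLevelOk (K : List String) : Bool :=
  (List.range K.length).all (fun i =>
    let k := K.getD i ""
    if PySem.Str.startswith k "+" then
      let b := PySem.Str.slice k (some 1) none
      if PySem.Str.startswith b "+" then
        match PySem.List.index? K b with
        | some j => decide (i < j)
        | none => false
      else K.contains b
    else true)

-- walk the prefixes with the accumulated key list (start: DEFAULT's keys; each level keeps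
-- only the non-'+' keys and appends the new keys of the next prefix section)
def pvPreAux (config : List (String × List (String × String))) :
    List String → List (List Char) → Bool
  | _, [] => true
  | prev, p :: ps =>
    let K := pvOrderedUnion prev (pvKeysAt config (String.ofList p))
    pvLevelOk K && pvPreAux config (K.filter (fun k => PySem.Str.startswith k "+" = false)) ps

-- Pre_ is EXACT: it excludes precisely the inputs on which Python's `merged[key[1:]] +=` hits a
-- missing base key and A (and B alike) raises KeyError; on every input where A returns, Pre_ holds.
def Pre_inherit_get (config : List (String × List (String × String))) (section_ : String) : Prop :=
  pvPreAux config (pvKeysAt config "DEFAULT") (pvPrefixList section_.toList) = true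
instance (config : List (String × List (String × String))) (section_ : String) : Decidable (Pre_inherit_get config section_) := by unfold Pre_inherit_get; infer_instance

def pvWitness_inherit_get : (List (String × List (String × String))) × String :=
  ([("DEFAULT", [("x", "1")]), ("a", [("+x", "2")])], "a")

def Spec_inherit_get (config : List (String × List (String × String))) (section_ : String) (out : List (String × String)) : Prop := out = inherit_get_alt config section_
instance (config : List (String × List (String × String))) (section_ : String) (out : List (String × String)) : Decidable (Spec_inherit_get config section_ out) := by unfold Spec_inherit_get; infer_instance

-- ===== CLAIM (what is proved, stated in full; the proofs are below) =====
def Claim_equal_inherit_get : Prop := ∀ (config : List (String × List (String × String))) (section_ : String), Dom_inherit_get config section_ → Pre_inherit_get config section_ → Spec_inherit_get config section_ (inherit_get config section_)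

-- ===== LEMMAS AND PROOFS =====

theorem pvSplit_nohyphen (a : List Char) (h : '-' ∉ a) : pvSplit a = [a] := by
  induction a with
  | nil => simp [pvSplit]
  | cons c rest ih =>
    simp only [pvSplit]
    rw [if_neg (by simp at h; exact fun hc => h.1 hc.symm), ih (by simp at h; exact h.2)]

theorem pvSplit_append (a b : List Char) (h : '-' ∉ a) :
    pvSplit (a ++ '-' :: b) = a :: pvSplit b := by
  induction a with
  | nil => simp [pvSplit]
  | cons c rest ih =>
    simp only [List.cons_append, pvSplit]
    rw [if_neg (by simp at h; exact fun hc => h.1 hc.symm), ih (by simp at h; exact h.2)]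

theorem mem_pvSplit_nohyphen (s : List Char) : ∀ c ∈ pvSplit s, '-' ∉ c := by
  induction s with
  | nil => simp [pvSplit]
  | cons c rest ih =>
    simp only [pvSplit]
    by_cases hc : c = '-'
    · rw [if_pos hc]
      intro x hx
      rcases List.mem_cons.mp hx with hx | hx
      · simp [hx]
      · exact ih x hx
    · rw [if_neg hc]
      rcases h : pvSplit rest with _ | ⟨a, t⟩
      · exact absurd h (pvSplit_ne_nil rest)
      · intro x hx
        rcases List.mem_cons.mp hx with hx | hx
        · subst hx
          intro hmem
          rcases List.mem_cons.mp hmem with h1 | h1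
          · exact hc h1.symm
          · exact ih a (by rw [h]; exact List.mem_cons_self) h1
        · exact ih x (by rw [h]; exact List.mem_cons_of_mem _ hx)

theorem pvSplit_join (xs : List (List Char)) (hne : xs ≠ []) (hfree : ∀ a ∈ xs, '-' ∉ a) :
    pvSplit (PySem.Chars.join ['-'] xs) = xs := by
  induction xs with
  | nil => exact absurd rfl hne
  | cons a t ih =>
    rcases t with _ | ⟨b, t'⟩
    · rw [PySem.Chars.join_singleton]
      exact pvSplit_nohyphen a (hfree a (by simp))
    · rw [PySem.Chars.join_cons_cons]
      have : a ++ ['-'] ++ PySem.Chars.join ['-'] (b :: t') = a ++ '-' :: PySem.Chars.join ['-'] (b :: t') := by simp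
      rw [this, pvSplit_append _ _ (hfree a (by simp)),
          ih (by simp) (fun x hx => hfree x (List.mem_cons_of_mem _ hx))]

theorem pvInheritA_nil (config : List (String × List (String × String))) :
    pvInheritA config [] = pvSafeGet config "DEFAULT" := by
  rw [pvInheritA]
  simp

theorem pvInheritA_level (config : List (String × List (String × String)))
    (xs : List (List Char)) (hne : xs ≠ []) (hfree : ∀ a ∈ xs, '-' ∉ a)
    (hj : PySem.Chars.join ['-'] xs ≠ []) :
    pvInheritA config (PySem.Chars.join ['-'] xs) =
      pvPlus (pvUpdate (pvInheritA config (PySem.Chars.join ['-'] xs.dropLast))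
        (pvSafeGet config (String.ofList (PySem.Chars.join ['-'] xs)))) := by
  rw [pvInheritA, dif_neg hj, pvSplitOn_eq, pvSplit_join xs hne hfree, PySem.List.slice_to_neg_one]

theorem pvFold_inv (config : List (String × List (String × String)))
    (rest : List (List Char)) : ∀ (done : List (List Char)), done ≠ [] →
    (∀ a ∈ done ++ rest, '-' ∉ a) →
    List.foldl (pvAltStep config)
      (some (PySem.Chars.join ['-'] done), pvInheritA config (PySem.Chars.join ['-'] done)) rest
    = (some (PySem.Chars.join ['-'] (done ++ rest)),
       pvInheritA config (PySem.Chars.join ['-'] (done ++ rest))) := by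
  induction rest with
  | nil => intro done _ _; simp
  | cons r rest' ih =>
    intro done hd hfree
    have hpfx : PySem.Chars.join ['-'] done ++ '-' :: r = PySem.Chars.join ['-'] (done ++ [r]) :=
      (pvJoin_append_singleton done r hd).symm
    have hpne : PySem.Chars.join ['-'] (done ++ [r]) ≠ [] := by
      rw [← hpfx]; simp
    have hstep : pvAltStep config
        (some (PySem.Chars.join ['-'] done), pvInheritA config (PySem.Chars.join ['-'] done)) r
        = (some (PySem.Chars.join ['-'] (done ++ [r])),
           pvInheritA config (PySem.Chars.join ['-'] (done ++ [r]))) := by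
      unfold pvAltStep
      simp only [hpfx, if_neg hpne]
      rw [pvInheritA_level config (done ++ [r]) (by simp)
            (by intro a ha
                apply hfree
                rcases List.mem_append.mp ha with h | h
                · exact List.mem_append.mpr (Or.inl h)
                · simp at h; subst h; simp)
            hpne]
      rw [List.dropLast_concat]
    rw [List.foldl_cons, hstep,
        ih (done ++ [r]) (by simp)
          (by intro a ha
              apply hfree
              rcases List.mem_append.mp ha with h | h
              · rcases List.mem_append.mp h with h' | h'
                · exact List.mem_append.mpr (Or.inl h')
                · simp at h'; subst h'; simp
              · simp [h]),
        List.append_assoc]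
    simp

-- ===== VERDICT (by name: the statement is the Claim_ definition above) =====
theorem inherit_get_spec : Claim_equal_inherit_get := by
  intro config section_ _ _
  unfold Spec_inherit_get inherit_get inherit_get_alt
  by_cases hs : section_.toList = []
  · rw [if_pos hs, hs, pvInheritA_nil]
  · rw [if_neg hs]
    have hfree := mem_pvSplit_nohyphen section_.toList
    rcases h : pvSplit section_.toList with _ | ⟨h0, rest⟩
    · exact absurd h (pvSplit_ne_nil _)
    · rw [pvSplitOn_eq, h]
      have hfree' : ∀ a ∈ h0 :: rest, '-' ∉ a := by rw [← h]; exact hfree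
      have hfirst : pvAltStep config (none, pvSafeGet config "DEFAULT") h0
          = (some (PySem.Chars.join ['-'] [h0]), pvInheritA config (PySem.Chars.join ['-'] [h0])) := by
        rw [PySem.Chars.join_singleton]
        by_cases h0e : h0 = []
        · subst h0e
          simp [pvAltStep, pvInheritA_nil]
        · have hfr : ∀ a ∈ ([h0] : List (List Char)), '-' ∉ a := by
            intro a ha; simp at ha; rw [ha]; exact hfree' h0 (by simp)
          have hlvl := pvInheritA_level config [h0] (by simp) hfr
            (by rw [PySem.Chars.join_singleton]; exact h0e)
          rw [PySem.Chars.join_singleton] at hlvl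
          rw [show ([h0] : List (List Char)).dropLast = [] from rfl, PySem.Chars.join_nil,
              pvInheritA_nil] at hlvl
          simp [pvAltStep, h0e, hlvl]
      rw [List.foldl_cons, hfirst,
          pvFold_inv config rest [h0] (by simp) (by simpa using hfree')]
      have : ([h0] : List (List Char)) ++ rest = h0 :: rest := by simp
      rw [this, ← h, pvJoin_pvSplit]
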